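-- pv_equiv track=rewrite | github.com/WoLewicki/Python-Projects | main2.py | calculate_length_of_unchecked
-- ===== SOURCE A (Python) =====
-- def calculate_length_of_unchecked(unchecked):
--     counter = 0
--     for elem in unchecked:  # i don't care about length of each variable
--         if elem == 0:  #!var
--             counter += 2
--         elif elem == 1:
--             counter += 1
--     return counter
-- ===== SOURCE B (Python) =====
-- def calculate_length_of_unchecked(unchecked):
--     # Divide and conquer: weighted count over index interval [lo, hi),
--     # splitting at the midpoint; base case handles one element directly.
--     def go(lo, hi):
--         if lo >= hi:
--             return 0
--         if hi - lo == 1: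
--             e = unchecked[lo]
--             return 2 if e == 0 else (1 if e == 1 else 0)
--         mid = (lo + hi) // 2
--         return go(lo, mid) + go(mid, hi)
--     return go(0, len(unchecked))
-- ===== Notes on version B (the rewrite author's own statement) =====
-- stated objective: alternative
-- what changed: Replaces A's single linear accumulating loop with a divide-and-conquer recursion over index intervals that splits at the midpoint and sums the two halves' weighted counts.
import Mathlib
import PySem

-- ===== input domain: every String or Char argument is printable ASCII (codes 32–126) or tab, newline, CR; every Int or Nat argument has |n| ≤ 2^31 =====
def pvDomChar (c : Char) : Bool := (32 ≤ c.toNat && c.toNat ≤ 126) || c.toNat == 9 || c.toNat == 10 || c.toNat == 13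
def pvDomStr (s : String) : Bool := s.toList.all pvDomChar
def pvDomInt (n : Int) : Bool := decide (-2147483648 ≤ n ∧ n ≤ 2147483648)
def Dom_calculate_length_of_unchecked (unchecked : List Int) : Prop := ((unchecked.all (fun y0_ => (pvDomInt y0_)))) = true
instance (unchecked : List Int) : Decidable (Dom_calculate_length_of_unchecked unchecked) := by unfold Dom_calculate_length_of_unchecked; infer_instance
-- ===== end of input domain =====

-- B replaces A's single accumulating loop with a divide-and-conquer recursion over index
-- intervals (alternative decomposition; same asymptotic cost).


-- ===== PORT A =====
def calculate_length_of_unchecked (unchecked : List Int) : Int :=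
  unchecked.foldl (fun counter elem =>
    if elem == 0 then counter + 2
    else if elem == 1 then counter + 1
    else counter) 0

-- ===== PORT B =====
-- go(lo, hi): weighted count over index interval [lo, hi).  unchecked[lo] is ported with
-- PySem.List.pyGetD (lo is always in range here); (lo+hi)//2 on the nonneg Nats lo, hi is
-- exactly Nat division.  The structural fuel (= an upper bound on hi - lo, which strictly
-- shrinks at each call) only makes the recursion total; it changes no computed value.
def cluGo (unchecked : List Int) (fuel lo hi : Nat) : Int :=
  match fuel with
  | 0 => 0
  | fuel + 1 =>
    if lo ≥ hi then 0
    else if hi - lo = 1 then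
      let e := PySem.List.pyGetD unchecked (lo : Int) 0
      if e == 0 then 2 else if e == 1 then 1 else 0
    else
      cluGo unchecked fuel lo ((lo + hi) / 2) + cluGo unchecked fuel ((lo + hi) / 2) hi

def calculate_length_of_unchecked_alt (unchecked : List Int) : Int :=
  cluGo unchecked unchecked.length 0 unchecked.length

-- ===== PRECONDITION & SPEC =====
def Spec_calculate_length_of_unchecked (unchecked : List Int) (out : Int) : Prop := out = calculate_length_of_unchecked_alt unchecked
instance (unchecked : List Int) (out : Int) : Decidable (Spec_calculate_length_of_unchecked unchecked out) := by unfold Spec_calculate_length_of_unchecked; infer_instance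

-- ===== CLAIM (what is proved, stated in full; the proofs are below) =====
def Claim_equal_calculate_length_of_unchecked : Prop := ∀ (unchecked : List Int), Dom_calculate_length_of_unchecked unchecked → Spec_calculate_length_of_unchecked unchecked (calculate_length_of_unchecked unchecked)

-- ===== LEMMAS AND PROOFS =====

-- per-element weight
def cluW (e : Int) : Int := if e == 0 then 2 else if e == 1 then 1 else 0

theorem cluGo_eq_sum (unchecked : List Int) :
    ∀ (fuel lo hi : Nat), hi - lo ≤ fuel →
      cluGo unchecked fuel lo hi
        = ∑ i ∈ Finset.Ico lo hi, cluW (unchecked.getD i 0) := by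
  intro fuel
  induction fuel with
  | zero =>
    intro lo hi h
    rw [cluGo, Finset.Ico_eq_empty (by omega : ¬ lo < hi), Finset.sum_empty]
  | succ n ih =>
    intro lo hi h
    rw [cluGo]
    split_ifs with h1 h2
    · rw [Finset.Ico_eq_empty (by omega : ¬ lo < hi), Finset.sum_empty]
    · have hhi : hi = lo + 1 := by omega
      subst hhi
      rw [Finset.sum_Ico_succ_top (le_refl lo), Finset.Ico_self, Finset.sum_empty]
      simp [cluW, PySem.List.pyGetD_natCast]
    · have hlt : lo < hi := by omega
      have hge2 : lo + 2 ≤ hi := by omega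
      have hmid1 : lo < (lo + hi) / 2 := by omega
      have hmid2 : (lo + hi) / 2 < hi := by omega
      rw [ih lo ((lo + hi) / 2) (by omega), ih ((lo + hi) / 2) hi (by omega),
        Finset.sum_Ico_consecutive _ (by omega) (by omega)]

theorem clu_foldl_eq_sum (l : List Int) (a : Int) :
    l.foldl (fun counter elem =>
      if elem == 0 then counter + 2
      else if elem == 1 then counter + 1
      else counter) a = a + (l.map cluW).sum := by
  induction l generalizing a with
  | nil => simp
  | cons x xs ih =>
    simp only [List.foldl_cons, ih, List.map_cons, List.sum_cons, cluW]
    split_ifs <;> ring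

theorem clu_sum_Ico_eq_map_sum (l : List Int) :
    ∑ i ∈ Finset.Ico 0 l.length, cluW (l.getD i 0) = (l.map cluW).sum := by
  rw [Finset.sum_Ico_eq_sum_range]
  simp only [Nat.sub_zero, Nat.zero_add]
  induction l with
  | nil => simp
  | cons x xs ih =>
    rw [List.length_cons, Finset.sum_range_succ']
    simp only [List.getD_cons_succ, List.getD_cons_zero]
    rw [ih, List.map_cons, List.sum_cons, add_comm]

-- ===== VERDICT (by name: the statement is the Claim_ definition above) =====
theorem calculate_length_of_unchecked_spec : Claim_equal_calculate_length_of_unchecked := by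
  intro unchecked _
  unfold Spec_calculate_length_of_unchecked calculate_length_of_unchecked calculate_length_of_unchecked_alt
  rw [clu_foldl_eq_sum, cluGo_eq_sum unchecked unchecked.length 0 unchecked.length (by omega),
    clu_sum_Ico_eq_map_sum]
  ring
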